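-- pv_equiv track=rewrite | github.com/tk1573-sys/AI-wellness-Buddy | backend/app/services/guardian_alert_service.py | is_crisis_keyword_present
-- ===== SOURCE A (Python) =====
-- _CRISIS_KEYWORDS: frozenset[str] = frozenset(
--     [
--         "kill myself",
--         "end my life",
--         "want to die",
--         "suicide",
--         "self harm",
--         "self-harm",
--         "hurt myself",
--         "no reason to live",
--         "can't go on",
--         "give up on life",
--         "disappear forever",
--     ]
-- )
--
-- _NEGATION_WORDS: tuple[str, ...] = (
--     "don't ",
--     "didn't ",
--     "won't ",
--     "not ",
--     "never ",
--     "no ",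
--     "doesn't ",
--     "i'm not",
--     "i am not",
-- )
--
-- def is_crisis_keyword_present(text: str) -> bool:
--     """Return True if *text* contains a crisis-intent keyword without a
--     preceding negation phrase.
--
--     Each keyword occurrence is checked for a negation word within the 40
--     characters immediately preceding the match.  This suppresses common
--     false positives such as:
--       - "I don't want to die laughing"     → negated ✓
--       - "I won't hurt myself, I promise"   → negated ✓
--       - "I want to die" / "I'll hurt myself" → not negated → True
--     """
--     lower = text.lower()
--     for kw in _CRISIS_KEYWORDS:
--         search_start = 0
--         while True:
--             pos = lower.find(kw, search_start)
--             if pos == -1: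
--                 break
--             # 40-char context window immediately preceding the keyword
--             prefix = lower[max(0, pos - 40):pos]
--             if not any(neg in prefix for neg in _NEGATION_WORDS):
--                 return True
--             search_start = pos + 1
--     return False
-- ===== SOURCE B (Python) =====
-- _CRISIS_KEYWORDS: frozenset[str] = frozenset(
--     [
--         "kill myself",
--         "end my life",
--         "want to die",
--         "suicide",
--         "self harm",
--         "self-harm",
--         "hurt myself",
--         "no reason to live",
--         "can't go on",
--         "give up on life",
--         "disappear forever",
--     ]
-- )
--
-- _KEYWORDS: tuple[str, ...] = tuple(sorted(_CRISIS_KEYWORDS))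
--
-- _NEGATION_WORDS: tuple[str, ...] = (
--     "don't ",
--     "didn't ",
--     "won't ",
--     "not ",
--     "never ",
--     "no ",
--     "doesn't ",
--     "i'm not",
--     "i am not",
-- )
--
--
-- def is_crisis_keyword_present(text: str) -> bool:
--     """Single left-to-right pass over positions: at each index, test whether any
--     crisis keyword starts there, and only then inspect the 40-char negation window."""
--     lower = text.lower()
--     for i in range(len(lower)):
--         if any(lower.startswith(kw, i) for kw in _KEYWORDS):
--             prefix = lower[max(0, i - 40):i]
--             if not any(neg in prefix for neg in _NEGATION_WORDS):
--                 return True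
--     return False
-- ===== Notes on version B (the rewrite author's own statement) =====
-- stated objective: alternative
-- what changed: Replaces the per-keyword repeated str.find scan loops with a single left-to-right pass over text positions that tests whether any keyword starts at each position and only then inspects the 40-char negation window.
import Mathlib
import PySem

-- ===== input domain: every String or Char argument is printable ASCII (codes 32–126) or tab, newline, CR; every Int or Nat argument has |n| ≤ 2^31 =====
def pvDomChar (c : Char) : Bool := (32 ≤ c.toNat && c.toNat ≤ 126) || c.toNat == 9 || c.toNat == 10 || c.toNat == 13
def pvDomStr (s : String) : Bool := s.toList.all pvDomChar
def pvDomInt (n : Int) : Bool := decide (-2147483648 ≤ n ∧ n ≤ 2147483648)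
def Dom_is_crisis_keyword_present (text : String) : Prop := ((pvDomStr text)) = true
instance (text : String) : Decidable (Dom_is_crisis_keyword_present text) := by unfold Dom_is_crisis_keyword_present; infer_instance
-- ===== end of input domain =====

-- B replaces A's per-keyword repeated find loops by one left-to-right pass over positions; objective: alternative (same result, different traversal).


-- _NEGATION_WORDS (shared module constant of both Pythons)
def pvNegationWords : List (List Char) :=
  ["don't ".toList, "didn't ".toList, "won't ".toList, "not ".toList, "never ".toList,
   "no ".toList, "doesn't ".toList, "i'm not".toList, "i am not".toList]

-- the shared negation-window test: `not any(neg in lower[max(0, p - 40):p] for neg in _NEGATION_WORDS)`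
def pvNoNegation (lower : List Char) (p : Nat) : Bool :=
  !(pvNegationWords.any fun neg =>
      PySem.Chars.isIn neg (PySem.List.slice lower (some (max 0 ((p : Int) - 40))) (some (p : Int))))

-- ===== PORT A =====
-- _CRISIS_KEYWORDS in source order (frozenset iteration order is immaterial: any hit returns True)
def pvCrisisKeywords : List (List Char) :=
  ["kill myself".toList, "end my life".toList, "want to die".toList, "suicide".toList,
   "self harm".toList, "self-harm".toList, "hurt myself".toList, "no reason to live".toList,
   "can't go on".toList, "give up on life".toList, "disappear forever".toList]

-- A's inner `while True` find-loop; fuel (= lower.length + 1) only makes the recursion total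
def pvScanKw (lower kw : List Char) : Nat → Nat → Bool
  | 0, _ => false
  | fuel + 1, s =>
      let pos := PySem.Chars.findFrom lower kw (s : Int)
      if pos = -1 then false
      else if pvNoNegation lower pos.toNat then true
      else pvScanKw lower kw fuel (pos.toNat + 1)

def is_crisis_keyword_present (text : String) : Bool :=
  let lower := PySem.Chars.lower text.toList
  pvCrisisKeywords.any fun kw => pvScanKw lower kw (lower.length + 1) 0

-- ===== PORT B =====
-- _KEYWORDS = tuple(sorted(_CRISIS_KEYWORDS)), precomputed
def pvKeywordsSorted : List (List Char) :=
  ["can't go on".toList, "disappear forever".toList, "end my life".toList,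
   "give up on life".toList, "hurt myself".toList, "kill myself".toList,
   "no reason to live".toList, "self harm".toList, "self-harm".toList,
   "suicide".toList, "want to die".toList]

-- `lower.startswith(kw, i)` for 0 ≤ i < len(lower) is exactly `startswith (lower.drop i) kw`
def is_crisis_keyword_present_alt (text : String) : Bool :=
  let lower := PySem.Chars.lower text.toList
  (List.range lower.length).any fun i =>
    (pvKeywordsSorted.any fun kw => PySem.Chars.startswith (List.drop i lower) kw)
      && pvNoNegation lower i

-- ===== PRECONDITION & SPEC =====
def Spec_is_crisis_keyword_present (text : String) (out : Bool) : Prop := out = is_crisis_keyword_present_alt text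
instance (text : String) (out : Bool) : Decidable (Spec_is_crisis_keyword_present text out) := by unfold Spec_is_crisis_keyword_present; infer_instance

-- ===== CLAIM (what is proved, stated in full; the proofs are below) =====
def Claim_equal_is_crisis_keyword_present : Prop := ∀ (text : String), Dom_is_crisis_keyword_present text → Spec_is_crisis_keyword_present text (is_crisis_keyword_present text)

-- ===== LEMMAS AND PROOFS =====

-- A's find-loop returns true iff some occurrence of kw at a position ≥ s has a clean window.
theorem pvScanKw_iff (L kw : List Char) (hkw : kw ≠ []) :
    ∀ (fuel s : Nat), s ≤ L.length → L.length + 1 - s ≤ fuel →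
      (pvScanKw L kw fuel s = true ↔ ∃ p, s ≤ p ∧ kw <+: L.drop p ∧ pvNoNegation L p = true) := by
  intro fuel
  induction fuel with
  | zero => intro s hs hf; omega
  | succ fuel ih =>
    intro s hs hf
    by_cases hpos : PySem.Chars.findFrom L kw (s : Int) = -1
    · simp only [pvScanKw, hpos]
      constructor
      · intro h; exact absurd h (by simp)
      · rintro ⟨p, hsp, hpref, -⟩
        have hinf : kw <:+: L.drop s := by
          rw [← PySem.Chars.isIn_iff_infix, ← PySem.Chars.exists_prefix_drop_iff_isIn]
          exact ⟨p - s, by rwa [List.drop_drop, Nat.add_sub_cancel' hsp]⟩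
        exact absurd ((PySem.Chars.findFrom_natCast_eq_neg_one_iff L kw s hs).mp hpos) (by exact fun h => h hinf)
    · obtain ⟨hge, hpref, hmin⟩ := PySem.Chars.findFrom_natCast_spec L kw s hs hpos
      set pos := PySem.Chars.findFrom L kw (s : Int) with hposdef
      have hpos0 : 0 ≤ pos := le_trans (by exact_mod_cast Nat.zero_le s) hge
      have hsle : s ≤ pos.toNat := by omega
      have hlt : pos.toNat < L.length := by
        have h1 : kw.length ≤ (L.drop pos.toNat).length := hpref.length_le
        have h2 : 0 < kw.length := List.length_pos_of_ne_nil hkw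
        simp only [List.length_drop] at h1; omega
      by_cases hcln : pvNoNegation L pos.toNat = true
      · simp only [pvScanKw, ← hposdef, if_neg hpos, if_pos hcln]
        exact iff_of_true trivial ⟨pos.toNat, hsle, hpref, hcln⟩
      · simp only [pvScanKw, ← hposdef, if_neg hpos, if_neg hcln]
        rw [ih (pos.toNat + 1) (by omega) (by omega)]
        constructor
        · rintro ⟨p, hp, h1, h2⟩; exact ⟨p, by omega, h1, h2⟩
        · rintro ⟨p, hp, h1, h2⟩
          refine ⟨p, ?_, h1, h2⟩
          rcases lt_trichotomy p pos.toNat with h | h | h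
          · exact absurd h1 (hmin p hp h)
          · exact absurd h2 (h ▸ hcln)
          · omega

theorem pv_mem_keywords_iff (kw : List Char) :
    kw ∈ pvCrisisKeywords ↔ kw ∈ pvKeywordsSorted :=
  List.Perm.mem_iff (by decide)

theorem pv_keywords_ne_nil : ∀ kw ∈ pvCrisisKeywords, kw ≠ [] := by decide

-- ===== VERDICT (by name: the statement is the Claim_ definition above) =====
theorem is_crisis_keyword_present_spec : Claim_equal_is_crisis_keyword_present := by
  intro text _
  unfold Spec_is_crisis_keyword_present is_crisis_keyword_present is_crisis_keyword_present_alt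
  set L := PySem.Chars.lower text.toList with hL
  rw [Bool.eq_iff_iff]
  simp only [List.any_eq_true, List.mem_range, Bool.and_eq_true, PySem.Chars.startswith_iff]
  constructor
  · rintro ⟨kw, hkw, hscan⟩
    obtain ⟨p, -, hpref, hcln⟩ :=
      (pvScanKw_iff L kw (pv_keywords_ne_nil kw hkw) (L.length + 1) 0 (Nat.zero_le _) (by omega)).mp hscan
    have hlt : p < L.length := by
      have h1 : kw.length ≤ (L.drop p).length := hpref.length_le
      have h2 : 0 < kw.length := List.length_pos_of_ne_nil (pv_keywords_ne_nil kw hkw)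
      simp only [List.length_drop] at h1; omega
    exact ⟨p, hlt, ⟨kw, (pv_mem_keywords_iff kw).mp hkw, hpref⟩, hcln⟩
  · rintro ⟨i, hi, ⟨kw, hkw, hpref⟩, hcln⟩
    have hkw' : kw ∈ pvCrisisKeywords := (pv_mem_keywords_iff kw).mpr hkw
    refine ⟨kw, hkw', ?_⟩
    exact (pvScanKw_iff L kw (pv_keywords_ne_nil kw hkw') (L.length + 1) 0 (Nat.zero_le _) (by omega)).mpr
      ⟨i, Nat.zero_le _, hpref, hcln⟩
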